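-- pv_equiv track=rewrite | github.com/jonaszilke/AdventOfCode | day2/solution.py | exercise1
-- ===== SOURCE A (Python) =====
-- from typing import List
--
-- def exercise1(puzzle_input: List[list]) -> int:
--     horizontal, depth = 0, 0
--     for i in puzzle_input:
--         if i[0] == 'forward':
--             horizontal += int(i[1])
--         elif i[0] == 'down':
--             depth += int(i[1])
--         elif i[0] == 'up':
--             depth -= int(i[1])
--     return horizontal * depth
-- ===== SOURCE B (Python) =====
-- def exercise1(puzzle_input):
--     horizontal = sum(int(i[1]) for i in puzzle_input if i[0] == 'forward')
--     down = sum(int(i[1]) for i in puzzle_input if i[0] == 'down')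
--     up = sum(int(i[1]) for i in puzzle_input if i[0] == 'up')
--     return horizontal * (down - up)
-- ===== Notes on version B (the rewrite author's own statement) =====
-- stated objective: idiomatic
-- what changed: The single stateful loop over (horizontal, depth) is replaced by three independent filtered sums (forward, down, up) combined as horizontal * (down - up).
import Mathlib
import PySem

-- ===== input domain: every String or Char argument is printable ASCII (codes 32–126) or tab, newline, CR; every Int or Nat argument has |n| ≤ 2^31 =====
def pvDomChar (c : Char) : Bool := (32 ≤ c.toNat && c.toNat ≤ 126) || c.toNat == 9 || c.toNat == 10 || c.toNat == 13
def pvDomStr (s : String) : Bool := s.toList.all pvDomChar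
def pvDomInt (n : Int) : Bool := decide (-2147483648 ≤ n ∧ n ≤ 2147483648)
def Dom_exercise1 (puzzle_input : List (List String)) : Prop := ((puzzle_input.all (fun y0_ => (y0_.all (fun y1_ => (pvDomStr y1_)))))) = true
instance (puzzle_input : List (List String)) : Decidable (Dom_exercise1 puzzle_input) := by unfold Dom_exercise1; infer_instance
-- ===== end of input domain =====

-- B changes structure only (three filtered sums instead of one stateful loop); equivalence is about the return value.

-- int(i[1]) of a row, defaulting to 0 outside Pre_ (Pre_ guarantees the accesses and parse succeed)
def pvRowInt (i : List String) : Int :=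
  (PySem.Int.ofStr? ((PySem.List.pyGet? i 1).getD "")).getD 0

-- ===== PORT A =====
def exercise1 (puzzle_input : List (List String)) : Int :=
  let st := puzzle_input.foldl (fun (hd : Int × Int) i =>
    if (PySem.List.pyGet? i 0).getD "" = "forward" then (hd.1 + pvRowInt i, hd.2)
    else if (PySem.List.pyGet? i 0).getD "" = "down" then (hd.1, hd.2 + pvRowInt i)
    else if (PySem.List.pyGet? i 0).getD "" = "up" then (hd.1, hd.2 - pvRowInt i)
    else hd) (0, 0)
  st.1 * st.2

-- ===== PORT B =====
def exercise1_alt (puzzle_input : List (List String)) : Int :=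
  let horizontal := ((puzzle_input.filter (fun i => (PySem.List.pyGet? i 0).getD "" = "forward")).map pvRowInt).sum
  let down := ((puzzle_input.filter (fun i => (PySem.List.pyGet? i 0).getD "" = "down")).map pvRowInt).sum
  let up := ((puzzle_input.filter (fun i => (PySem.List.pyGet? i 0).getD "" = "up")).map pvRowInt).sum
  horizontal * (down - up)

-- ===== PRECONDITION & SPEC =====
-- Pre_ excludes exactly the inputs on which the Python raises: a row that is empty
-- (i[0] → IndexError) or a command row whose second field is missing or not int()-parsable.
def Pre_exercise1 (puzzle_input : List (List String)) : Prop :=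
  ∀ i ∈ puzzle_input, i ≠ [] ∧
    ((PySem.List.pyGet? i 0).getD "" = "forward" ∨ (PySem.List.pyGet? i 0).getD "" = "down" ∨
     (PySem.List.pyGet? i 0).getD "" = "up" →
      2 ≤ i.length ∧ (PySem.Int.ofStr? ((PySem.List.pyGet? i 1).getD "")).isSome = true)
instance (puzzle_input : List (List String)) : Decidable (Pre_exercise1 puzzle_input) := by
  unfold Pre_exercise1; infer_instance

def pvWitness_exercise1 : List (List String) := [["forward", "3"], ["down", " 5 "], ["up", "+2"], ["halt"]]

def Spec_exercise1 (puzzle_input : List (List String)) (out : Int) : Prop := out = exercise1_alt puzzle_input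
instance (puzzle_input : List (List String)) (out : Int) : Decidable (Spec_exercise1 puzzle_input out) := by unfold Spec_exercise1; infer_instance

-- ===== CLAIM (what is proved, stated in full; the proofs are below) =====
def Claim_equal_exercise1 : Prop := ∀ (puzzle_input : List (List String)), Dom_exercise1 puzzle_input → Pre_exercise1 puzzle_input → Spec_exercise1 puzzle_input (exercise1 puzzle_input)

-- ===== LEMMAS AND PROOFS =====

def pvCmd (i : List String) : String := (PySem.List.pyGet? i 0).getD ""

def pvSumOf (c : String) (xs : List (List String)) : Int :=
  ((xs.filter (fun i => pvCmd i = c)).map pvRowInt).sum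

theorem exercise1_foldl (xs : List (List String)) (h d : Int) :
    xs.foldl (fun (hd : Int × Int) i =>
      if (PySem.List.pyGet? i 0).getD "" = "forward" then (hd.1 + pvRowInt i, hd.2)
      else if (PySem.List.pyGet? i 0).getD "" = "down" then (hd.1, hd.2 + pvRowInt i)
      else if (PySem.List.pyGet? i 0).getD "" = "up" then (hd.1, hd.2 - pvRowInt i)
      else hd) (h, d)
    = (h + pvSumOf "forward" xs, d + (pvSumOf "down" xs - pvSumOf "up" xs)) := by
  induction xs generalizing h d with
  | nil => simp [pvSumOf]
  | cons a xs ih =>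
    simp only [List.foldl_cons]
    by_cases hf : (PySem.List.pyGet? a 0).getD "" = "forward" <;>
      by_cases hdn : (PySem.List.pyGet? a 0).getD "" = "down" <;>
        by_cases hu : (PySem.List.pyGet? a 0).getD "" = "up" <;>
          simp [hf, hdn, hu, ih, pvSumOf, pvCmd] <;> ring

-- ===== VERDICT (by name: the statement is the Claim_ definition above) =====
theorem exercise1_spec : Claim_equal_exercise1 := by
  intro xs _ _
  unfold Spec_exercise1 exercise1 exercise1_alt
  rw [exercise1_foldl]
  simp only [pvSumOf, pvCmd, zero_add]
  rfl
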